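-- pv_equiv track=rewrite | github.com/mayankchauhan4/DSA | binary_search.py | binserch
-- ===== SOURCE A (Python) =====
-- def binserch(letters,target):
--     start=0
--     end=len(letters)-1
--     while(start<=end):
--         mid=(start+end)//2
--         if (letters[mid]==target):
--             return letters[mid+1]
--         elif (letters[mid]>target):
--             end=mid-1
--         elif (letters[mid]<target):
--             start=mid+1
--     return letters[0]
-- ===== SOURCE B (Python) =====
-- def binserch(letters, target):
--     def go(seg, base):
--         if not seg:
--             return letters[0]
--         m = (len(seg) - 1) // 2
--         v = seg[m]
--         if v == target:
--             return letters[base + m + 1]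
--         if v > target:
--             return go(seg[:m], base)
--         return go(seg[m + 1:], base + m + 1)
--     return go(letters, 0)
-- ===== Notes on version B (the rewrite author's own statement) =====
-- stated objective: alternative
-- what changed: A's iterative two-index (start,end) while-loop is replaced by a recursion over explicit list slices carrying a base offset, preserving the exact midpoint probe sequence (including on unsorted/duplicate input); Pre_ excludes only the inputs where both programs raise IndexError (empty list, or the search matching at the last index).
import Mathlib
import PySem

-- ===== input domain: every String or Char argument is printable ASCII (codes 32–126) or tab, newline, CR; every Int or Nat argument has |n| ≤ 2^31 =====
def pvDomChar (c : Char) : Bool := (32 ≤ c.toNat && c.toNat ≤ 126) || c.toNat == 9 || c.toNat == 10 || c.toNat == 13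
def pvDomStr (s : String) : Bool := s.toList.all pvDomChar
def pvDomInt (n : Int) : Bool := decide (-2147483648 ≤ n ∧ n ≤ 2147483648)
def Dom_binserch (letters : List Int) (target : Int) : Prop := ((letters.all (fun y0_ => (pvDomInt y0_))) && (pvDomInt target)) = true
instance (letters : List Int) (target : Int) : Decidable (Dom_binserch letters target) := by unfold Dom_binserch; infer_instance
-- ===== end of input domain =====

-- B replaces A's iterative two-index while-loop by recursion over explicit list
-- slices with a base offset (objective: alternative decomposition, same probe sequence).


-- ===== PORT A =====
-- the while-loop over the mutable pair (start, end); mid = (start+end)//2 is written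
-- out at each use; letters[...] is ported with pyGetD (Pre_ excludes exactly the inputs
-- where the Python indexing raises IndexError); fuel is only a totality guard: it bounds
-- the iteration count (the loop measure (e+1-s).toNat strictly decreases) and binserch
-- passes enough fuel to never hit the 0 case on a reachable state
def binserchLoop (letters : List Int) (target : Int) (fuel : Nat) (s e : Int) : Int :=
  match fuel with
  | 0 => PySem.List.pyGetD letters 0 0
  | fuel + 1 =>
    if s ≤ e then
      if PySem.List.pyGetD letters (PySem.Int.floordiv (s + e) 2) 0 = target then
        PySem.List.pyGetD letters (PySem.Int.floordiv (s + e) 2 + 1) 0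
      else if PySem.List.pyGetD letters (PySem.Int.floordiv (s + e) 2) 0 > target then
        binserchLoop letters target fuel s (PySem.Int.floordiv (s + e) 2 - 1)
      else
        binserchLoop letters target fuel (PySem.Int.floordiv (s + e) 2 + 1) e
    else PySem.List.pyGetD letters 0 0

def binserch (letters : List Int) (target : Int) : Int :=
  binserchLoop letters target letters.length 0 ((letters.length : Int) - 1)

-- ===== PORT B =====
-- go(seg, base): m = (len(seg)-1)//2 is nonnegative, so Python's (len-1)//2 is Nat
-- division and seg[:m] / seg[m+1:] are List.take / List.drop — exact on this domain;
-- fuel (bounded by the strictly decreasing seg.length) is only a totality guard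
def binserchGo (letters : List Int) (target : Int) (fuel : Nat) (seg : List Int) (base : Int) : Int :=
  match fuel with
  | 0 => PySem.List.pyGetD letters 0 0
  | fuel + 1 =>
    if seg = [] then PySem.List.pyGetD letters 0 0
    else if PySem.List.pyGetD seg (((seg.length - 1) / 2 : Nat) : Int) 0 = target then
      PySem.List.pyGetD letters (base + (((seg.length - 1) / 2 : Nat) : Int) + 1) 0
    else if PySem.List.pyGetD seg (((seg.length - 1) / 2 : Nat) : Int) 0 > target then
      binserchGo letters target fuel (seg.take ((seg.length - 1) / 2)) base
    else
      binserchGo letters target fuel (seg.drop ((seg.length - 1) / 2 + 1))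
        (base + (((seg.length - 1) / 2 : Nat) : Int) + 1)

def binserch_alt (letters : List Int) (target : Int) : Int :=
  binserchGo letters target letters.length letters 0

-- ===== PRECONDITION & SPEC =====
-- A's only IndexErrors: letters[0] on the empty list, and letters[mid+1] when the
-- matching probe is the LAST index. The last index is probed only after every earlier
-- probe took the start:=mid+1 branch, and those probed positions form a fixed "right
-- spine" determined by the length alone: their distances from the last index are
-- spineDists (n-1) (d, then recurse on (d-1)/2). spineDists is a numeric function of
-- the length, not a re-run of the search.
-- structural recursion on the first argument (a bound ≥ t, we pass t itself) so that
-- the kernel can evaluate it; the value depends only on t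
def spineDists : Nat → Nat → List Nat
  | 0, _ => []
  | _, 0 => []
  | b + 1, t + 1 => (t + 2) / 2 :: spineDists b (t / 2)

-- Pre_ excludes exactly the inputs on which Python's A raises IndexError: the empty
-- list, and lists whose last element equals target while every right-spine probe
-- position holds a value < target (so the search reaches the last index and matches).
def Pre_binserch (letters : List Int) (target : Int) : Prop :=
  letters ≠ [] ∧
  ¬ (letters.getD (letters.length - 1) 0 = target ∧
     ∀ d ∈ spineDists (letters.length - 1) (letters.length - 1), letters.getD (letters.length - 1 - d) 0 < target)
instance (letters : List Int) (target : Int) : Decidable (Pre_binserch letters target) := by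
  unfold Pre_binserch; infer_instance
def pvWitness_binserch : List Int × Int := ([1, 3, 5], 3)
def Spec_binserch (letters : List Int) (target : Int) (out : Int) : Prop := out = binserch_alt letters target
instance (letters : List Int) (target : Int) (out : Int) : Decidable (Spec_binserch letters target out) := by unfold Spec_binserch; infer_instance

-- ===== CLAIM (what is proved, stated in full; the proofs are below) =====
def Claim_equal_binserch : Prop := ∀ (letters : List Int) (target : Int), Dom_binserch letters target → Pre_binserch letters target → Spec_binserch letters target (binserch letters target)

-- ===== LEMMAS AND PROOFS =====

-- loop ↔ slice-recursion correspondence: with enough fuel (≥ the loop measure, which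
-- is exactly the segment length) the loop on (s, e) equals go on the segment
-- letters[s .. e] with base s
theorem binserchLoop_eq_go (letters : List Int) (target : Int) :
    ∀ (fuel : Nat) (s e : Int), (e + 1 - s).toNat ≤ fuel → 0 ≤ s → e < (letters.length : Int) →
      binserchLoop letters target fuel s e =
        binserchGo letters target fuel ((letters.drop s.toNat).take (e + 1 - s).toNat) s := by
  intro fuel
  induction fuel with
  | zero => intro s e _ _ _; rfl
  | succ f ih =>
    intro s e hf hs he
    by_cases hse : s ≤ e
    · have hL : ((e + 1 - s).toNat : Int) = e + 1 - s := by omega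
      have hseg : ((letters.drop s.toNat).take (e + 1 - s).toNat).length = (e + 1 - s).toNat := by
        simp [List.length_take, List.length_drop]; omega
      have hsegne : (letters.drop s.toNat).take (e + 1 - s).toNat ≠ [] := by
        intro hnil
        rw [hnil] at hseg
        simp at hseg
        omega
      rw [binserchLoop, binserchGo, if_pos hse, if_neg hsegne]
      set L : Nat := (e + 1 - s).toNat with hLdef
      rw [hseg]
      have hmid : PySem.Int.floordiv (s + e) 2 = s + (((L - 1) / 2 : Nat) : Int) := by
        rw [PySem.Int.floordiv_eq_ediv_of_pos (by omega)]
        omega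
      set m : Nat := (L - 1) / 2 with hmdef
      have hmL : m < L := by omega
      have hv : PySem.List.pyGetD ((letters.drop s.toNat).take L) (m : Int) 0 =
          PySem.List.pyGetD letters (PySem.Int.floordiv (s + e) 2) 0 := by
        rw [hmid, PySem.List.pyGetD_natCast]
        have hc : s + (m : Int) = ((s.toNat + m : Nat) : Int) := by omega
        rw [hc, PySem.List.pyGetD_natCast]
        have h1 : m < ((letters.drop s.toNat).take L).length := by rw [hseg]; exact hmL
        have h2 : s.toNat + m < letters.length := by omega
        rw [List.getD_eq_getElem _ _ h1, List.getD_eq_getElem _ _ h2]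
        simp [List.getElem_take, List.getElem_drop]
      rw [hv]
      by_cases h1 : PySem.List.pyGetD letters (PySem.Int.floordiv (s + e) 2) 0 = target
      · rw [if_pos h1, if_pos h1, hmid]
      · rw [if_neg h1, if_neg h1]
        by_cases h2 : PySem.List.pyGetD letters (PySem.Int.floordiv (s + e) 2) 0 > target
        · rw [if_pos h2, if_pos h2]
          -- branch end := mid - 1; the new segment is the take-m prefix
          have hrec := ih s (PySem.Int.floordiv (s + e) 2 - 1)
            (by rw [hmid]; omega) hs
            (by rw [hmid]; omega)
          rw [hrec]
          have hnewL : (PySem.Int.floordiv (s + e) 2 - 1 + 1 - s).toNat = m := by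
            rw [hmid]; omega
          rw [hnewL, List.take_take, Nat.min_eq_left (Nat.le_of_lt hmL)]
        · rw [if_neg h2, if_neg h2]
          -- branch start := mid + 1; the new segment is the drop-(m+1) suffix
          have hrec := ih (PySem.Int.floordiv (s + e) 2 + 1) e
            (by rw [hmid]; omega) (by rw [hmid]; omega) he
          rw [hmid] at hrec ⊢
          rw [hrec]
          have h1' : (e + 1 - (s + (m : Int) + 1)).toNat = L - (m + 1) := by omega
          have h2' : (s + (m : Int) + 1).toNat = s.toNat + (m + 1) := by omega
          rw [h1', h2', List.drop_take, ← List.drop_drop]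
    · have hL0 : (e + 1 - s).toNat = 0 := by omega
      rw [binserchLoop, if_neg hse, hL0]
      cases f <;> simp [binserchGo]

-- ===== VERDICT (by name: the statement is the Claim_ definition above) =====
theorem binserch_spec : Claim_equal_binserch := by
  intro letters target _ _
  unfold Spec_binserch binserch binserch_alt
  rw [binserchLoop_eq_go letters target letters.length 0 ((letters.length : Int) - 1)
      (by omega) (by omega) (by omega)]
  simp
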